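-- pv_equiv track=rewrite | github.com/981377660LMT/algorithm-study | 7_graph/哈密尔顿/竞赛图(完全图)SCC分解.py | sccTourByIndegs
-- ===== SOURCE A (Python) =====
-- from typing import List, Tuple
--
-- def sccTourByIndegs(indeg: List[int]) -> Tuple[int, List[int]]:
--     """给定竞赛图(Tournament, 有向完全图)的每个点的入度, 返回SCC的个数和每个点所属的SCC的编号"""
--     n = len(indeg)
--     order = sorted(range(n), key=lambda x: indeg[x])
--     sccId = [0] * n
--     degSum = 0
--     nextId = 0
--     for i in range(n):
--         cur = order[i]
--         sccId[cur] = nextId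
--         degSum += indeg[cur]
--         diff = degSum - (i + 1) * i // 2  # 前i个点构成了一个强连通分量
--         if diff == 0:
--             nextId += 1
--     return nextId, sccId
-- ===== SOURCE B (Python) =====
-- def sccTourByIndegs(indeg):
--     """Staged alternative: never argsorts the indices. Sort the indegree VALUES,
--     compute a per-sorted-position component label by one prefix pass, then place
--     each vertex via its stable rank (first index of its value + earlier equals)."""
--     n = len(indeg)
--     vals = sorted(indeg)
--     # labels[i] = component id of the vertex at sorted position i; c = total count
--     labels = [0] * n
--     s = 0
--     c = 0
--     for i, d in enumerate(vals):
--         labels[i] = c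
--         s += d
--         if s == (i + 1) * i // 2:
--             c += 1
--     # first sorted position of each distinct value
--     start = {}
--     for i, d in enumerate(vals):
--         if d not in start:
--             start[d] = i
--     # stable rank: hand out positions within each value block in index order
--     sccId = [0] * n
--     nxt = start
--     for v, d in enumerate(indeg):
--         p = nxt[d]
--         nxt[d] = p + 1
--         sccId[v] = labels[p]
--     return c, sccId
-- ===== Notes on version B (the rewrite author's own statement) =====
-- stated objective: alternative
-- what changed: B never argsorts the indices: it sorts only the values, computes a per-sorted-position component label array in one prefix pass, and then places each vertex independently via its stable rank (first sorted position of its value, from a dict of block offsets, plus the number of earlier equal values).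
import Mathlib
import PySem

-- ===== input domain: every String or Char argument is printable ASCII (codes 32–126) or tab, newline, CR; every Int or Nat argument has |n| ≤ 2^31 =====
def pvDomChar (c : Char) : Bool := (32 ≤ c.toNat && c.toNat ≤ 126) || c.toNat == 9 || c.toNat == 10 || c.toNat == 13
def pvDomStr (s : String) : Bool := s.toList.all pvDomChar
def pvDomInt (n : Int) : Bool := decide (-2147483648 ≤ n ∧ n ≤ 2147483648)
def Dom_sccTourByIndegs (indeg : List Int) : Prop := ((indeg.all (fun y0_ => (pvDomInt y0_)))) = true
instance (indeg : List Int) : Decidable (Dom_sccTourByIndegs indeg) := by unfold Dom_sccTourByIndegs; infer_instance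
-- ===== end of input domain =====

-- B replaces A's argsort-then-assign loop by three staged passes: sort the values only,
-- compute per-sorted-position labels, then place each vertex by its stable rank from a dict
-- of value-block offsets (alternative decomposition, same asymptotic cost).


-- ===== PORT A =====
def sccTourByIndegs (indeg : List Int) : Int × List Int :=
  let n : Int := indeg.length
  let order := PySem.List.sorted (PySem.List.pyRange 0 n) (fun x => PySem.List.pyGetD indeg x 0)
  let sccId := PySem.List.pyRepeat [(0 : Int)] n
  let st := (PySem.List.pyRange 0 n).foldl
    (fun (st : List Int × Int × Int) i =>
      let cur := PySem.List.pyGetD order i 0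
      -- sccId[cur] = nextId: cur is drawn from range(n), so the index is in range (exact here)
      let sccId' := st.1.set cur.toNat st.2.2
      let degSum' := st.2.1 + PySem.List.pyGetD indeg cur 0
      let diff := degSum' - PySem.Int.floordiv ((i + 1) * i) 2
      (sccId', degSum', if diff = 0 then st.2.2 + 1 else st.2.2))
    (sccId, 0, 0)
  (st.2.2, st.1)

-- ===== PORT B =====
def sccTourByIndegs_alt (indeg : List Int) : Int × List Int :=
  let n : Int := indeg.length
  let vals := PySem.List.sorted indeg (fun x => x)
  -- labels pass: labels[i] = c before processing sorted position i
  let lab := (PySem.List.enumerate vals).foldl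
    (fun (st : List Int × Int × Int) p =>
      -- labels[i] = c: i is an enumerate index, in range (exact here)
      let labels' := st.1.set p.1.toNat st.2.2
      let s' := st.2.1 + p.2
      (labels', s', if s' = PySem.Int.floordiv ((p.1 + 1) * p.1) 2 then st.2.2 + 1 else st.2.2))
    (PySem.List.pyRepeat [(0 : Int)] n, 0, 0)
  let labels := lab.1
  let c := lab.2.2
  -- first sorted position of each distinct value
  let start := (PySem.List.enumerate vals).foldl
    (fun (st : PySem.Dict Int Int) p =>
      if st.contains p.2 then st else st.insert p.2 p.1)
    PySem.Dict.empty
  -- placement pass: nxt[d] is always present (d occurs in vals), so KeyError is impossible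
  -- and the looked-up position is always in range (exact here)
  let fin := (PySem.List.enumerate indeg).foldl
    (fun (st : PySem.Dict Int Int × List Int) q =>
      let p := st.1.getD q.2 0
      (st.1.insert q.2 (p + 1), st.2.set q.1.toNat (PySem.List.pyGetD labels p 0)))
    (start, PySem.List.pyRepeat [(0 : Int)] n)
  (c, fin.2)

-- ===== PRECONDITION & SPEC =====
def Spec_sccTourByIndegs (indeg : List Int) (out : Int × List Int) : Prop := out = sccTourByIndegs_alt indeg
instance (indeg : List Int) (out : Int × List Int) : Decidable (Spec_sccTourByIndegs indeg out) := by unfold Spec_sccTourByIndegs; infer_instance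

-- ===== CLAIM (what is proved, stated in full; the proofs are below) =====
def Claim_equal_sccTourByIndegs : Prop := ∀ (indeg : List Int), Dom_sccTourByIndegs indeg → Spec_sccTourByIndegs indeg (sccTourByIndegs indeg)

-- ===== LEMMAS AND PROOFS =====

-- the label sequence of the prefix pass: position k, running sum s, running count c
def pvLabs : List Int → Int → Int → Int → List Int × Int
  | [], _, _, c => ([], c)
  | d :: t, k, s, c =>
    let c' := if s + d = PySem.Int.floordiv ((k + 1) * k) 2 then c + 1 else c
    let r := pvLabs t (k + 1) (s + d) c'
    (c :: r.1, r.2)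

theorem pvLabs_length (w : List Int) : ∀ (k s c : Int), (pvLabs w k s c).1.length = w.length := by
  induction w with
  | nil => intro k s c; simp [pvLabs]
  | cons d t ih => intro k s c; simp [pvLabs, ih]

-- A's loop state recursion over the sorted index list
def pvRun (indeg : List Int) : List Int → Int → List Int → Int → Int → List Int × Int × Int
  | [], _, s, ds, nid => (s, ds, nid)
  | v :: t, k, s, ds, nid =>
    pvRun indeg t (k + 1) (s.set v.toNat nid) (ds + PySem.List.pyGetD indeg v 0)
      (if ds + PySem.List.pyGetD indeg v 0 - PySem.Int.floordiv ((k + 1) * k) 2 = 0 then nid + 1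
       else nid)

theorem pvFoldA (indeg order : List Int) : ∀ (t : List Int) (k : Nat), order.drop k = t →
    ∀ (s : List Int) (ds nid : Int),
    (PySem.List.pyRange (k : Int) (order.length : Int)).foldl
      (fun (st : List Int × Int × Int) i =>
        let cur := PySem.List.pyGetD order i 0
        let sccId' := st.1.set cur.toNat st.2.2
        let degSum' := st.2.1 + PySem.List.pyGetD indeg cur 0
        let diff := degSum' - PySem.Int.floordiv ((i + 1) * i) 2
        (sccId', degSum', if diff = 0 then st.2.2 + 1 else st.2.2))
      (s, ds, nid)
    = pvRun indeg t (k : Int) s ds nid := by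
  intro t
  induction t with
  | nil =>
    intro k hk s ds nid
    have hlen : order.length ≤ k := by
      by_contra hcon
      have := List.drop_eq_nil_iff.mp hk
      omega
    have : PySem.List.pyRange (k : Int) (order.length : Int) = [] := by
      simp [PySem.List.pyRange]
      omega
    simp [this, pvRun]
  | cons v t ih =>
    intro k hk s ds nid
    have hklt : k < order.length := by
      by_contra hcon
      rw [List.drop_eq_nil_iff.mpr (by omega)] at hk
      simp at hk
    rw [PySem.List.pyRange_one_cons (by exact_mod_cast hklt)]
    rw [List.foldl_cons]
    have hget : PySem.List.pyGetD order (k : Int) 0 = v := by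
      rw [PySem.List.pyGetD_eq_getElem order 0 (by positivity) (by exact_mod_cast hklt)]
      have h0 : (order.drop k)[0]'(by simp [hk]) = order[k + 0]'(by omega) := List.getElem_drop
      simp [hk] at h0
      simpa [Int.toNat_natCast] using h0.symm
    have hdrop : order.drop (k + 1) = t := by
      have h1 : (List.drop k order).tail = List.drop (k + 1) order := List.tail_drop
      rw [hk] at h1
      simpa using h1.symm
    have := ih (k + 1) hdrop
        (s.set v.toNat nid) (ds + PySem.List.pyGetD indeg v 0)
        (if ds + PySem.List.pyGetD indeg v 0 - PySem.Int.floordiv (((k : Int) + 1) * k) 2 = 0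
         then nid + 1 else nid)
    simp only [hget]
    rw [show ((k : Int) + 1) = (((k + 1 : Nat) : Int)) by push_cast; ring] at this ⊢
    rw [this]
    simp [pvRun]

-- pvRun is a pure set-fold over the zip with the label sequence
theorem pvRunToSets (indeg : List Int) : ∀ (w : List Int) (k : Int) (z : List Int) (s c : Int),
    (pvRun indeg w k z s c).1
      = ((w.map Int.toNat).zip (pvLabs (w.map (fun x => PySem.List.pyGetD indeg x 0)) k s c).1).foldl
          (fun l p => l.set p.1 p.2) z
    ∧ (pvRun indeg w k z s c).2.2
      = (pvLabs (w.map (fun x => PySem.List.pyGetD indeg x 0)) k s c).2 := by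
  intro w
  induction w with
  | nil => intro k z s c; simp [pvRun, pvLabs]
  | cons v t ih =>
    intro k z s c
    simp only [pvRun, List.map_cons, pvLabs, List.zip_cons_cons, List.foldl_cons]
    simp only [sub_eq_zero]
    exact ih (k + 1) (z.set v.toNat c) (s + PySem.List.pyGetD indeg v 0) _

-- B's labels pass computes exactly the label sequence
theorem pvLabelsFold (w : List Int) : ∀ (s : Nat) (z : List Int) (s0 c : Int),
    s + w.length ≤ z.length →
    (PySem.List.enumerate w (s : Int)).foldl
      (fun (st : List Int × Int × Int) p =>
        let labels' := st.1.set p.1.toNat st.2.2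
        let s' := st.2.1 + p.2
        (labels', s', if s' = PySem.Int.floordiv ((p.1 + 1) * p.1) 2 then st.2.2 + 1 else st.2.2))
      (z, s0, c)
    = (z.take s ++ (pvLabs w (s : Int) s0 c).1 ++ z.drop (s + w.length), s0 + w.sum,
        (pvLabs w (s : Int) s0 c).2) := by
  induction w with
  | nil => intro s z s0 c _; simp [pvLabs, PySem.List.enumerate]
  | cons d t ih =>
    intro s z s0 c hle
    simp only [List.length_cons] at hle
    have hs : s < z.length := by omega
    rw [PySem.List.enumerate_cons, List.foldl_cons]
    simp only [pvLabs]
    have hcast : ((s : Int) + 1) = ((s + 1 : Nat) : Int) := by push_cast; ring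
    rw [hcast]
    rw [ih (s + 1) (z.set (Int.toNat s) c) (s0 + d) _ (by simp; omega)]
    have hset : z.set (Int.toNat (s : Int)) c = z.take s ++ c :: z.drop (s + 1) := by
      rw [Int.toNat_natCast, List.set_eq_take_append_cons_drop]
      simp [hs]
    have h1 : (z.set (Int.toNat (s : Int)) c).take (s + 1) = z.take s ++ [c] := by
      rw [hset, List.take_append, List.length_take]
      have : min s z.length = s := by omega
      rw [this]
      have h2 : s + 1 - s = 1 := by omega
      simp [List.take_take, h2]
    have h3 : (z.set (Int.toNat (s : Int)) c).drop (s + 1 + t.length) = z.drop (s + 1 + t.length) := by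
      rw [List.drop_set, if_pos (show Int.toNat (s : Int) < s + 1 + t.length by simp; omega)]
    rw [h1, h3]
    have h4 : s + 1 + t.length = s + (t.length + 1) := by omega
    simp [h4]
    ring

-- the start dict maps d to its first index in w (offset by the enumerate start)
theorem pvStartGet : ∀ (w : List Int) (s : Int) (dict : PySem.Dict Int Int) (d : Int),
    ((PySem.List.enumerate w s).foldl
        (fun (st : PySem.Dict Int Int) p =>
          if st.contains p.2 then st else st.insert p.2 p.1) dict).get? d
      = if dict.contains d then dict.get? d else (List.idxOf? d w).map (fun k => s + (k : Int)) := by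
  intro w
  induction w with
  | nil =>
    intro s dict d
    simp only [PySem.List.enumerate, List.foldl_nil, List.idxOf?_nil]
    split_ifs with h
    · rfl
    · exact (PySem.Dict.get?_eq_none_iff_contains dict d).mpr (by simpa using h)
  | cons a t ih =>
    intro s dict d
    rw [PySem.List.enumerate_cons, List.foldl_cons]
    by_cases hca : dict.contains a = true
    · rw [if_pos hca, ih (s + 1) dict d]
      by_cases hcd : dict.contains d = true
      · rw [if_pos hcd, if_pos hcd]
      · rw [if_neg hcd, if_neg hcd]
        have hda : ¬ a = d := fun h => hcd (h ▸ hca)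
        rw [List.idxOf?_cons]
        simp only [beq_iff_eq, if_neg hda]
        cases hx : List.idxOf? d t with
        | none => simp
        | some k => simp; ring
    · rw [if_neg hca, ih (s + 1) (dict.insert a s) d]
      rw [PySem.Dict.contains_insert]
      by_cases hda : d = a
      · subst hda
        have h1 : (d == d || dict.contains d) = true := by simp
        rw [if_pos h1, PySem.Dict.get?_insert_self]
        rw [if_neg hca, List.idxOf?_cons]
        simp
      · by_cases hcd : dict.contains d = true
        · have h1 : (d == a || dict.contains d) = true := by simp [hcd]
          rw [if_pos h1, if_pos hcd]
          exact PySem.Dict.get?_insert_of_ne dict s hda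
        · have h1 : ¬ ((d == a || dict.contains d) = true) := by simp [hda, hcd]
          rw [if_neg h1, if_neg hcd]
          rw [List.idxOf?_cons]
          simp only [beq_iff_eq, if_neg (show ¬ a = d from fun h => hda h.symm)]
          cases hx : List.idxOf? d t with
          | none => simp
          | some k => simp; ring

-- in a ≤-sorted list the first index of a member is the number of strictly smaller elements
theorem pvIdxOfSorted : ∀ (w : List Int), w.Pairwise (· ≤ ·) → ∀ d ∈ w,
    List.idxOf? d w = some (w.countP (fun x => decide (x < d))) := by
  intro w
  induction w with
  | nil => intro _ d hd; simp at hd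
  | cons a t ih =>
    intro hp d hd
    rw [List.pairwise_cons] at hp
    rw [List.idxOf?_cons, List.countP_cons]
    by_cases hda : a = d
    · subst hda
      rw [if_pos (by simp)]
      have hz : t.countP (fun x => decide (x < a)) = 0 := by
        rw [List.countP_eq_zero]
        intro x hx
        simp only [decide_eq_true_eq]
        exact not_lt.mpr (hp.1 x hx)
      simp [hz]
    · rw [if_neg (by simp [hda])]
      have hdt : d ∈ t := by
        rcases List.mem_cons.mp hd with h | h
        · exact absurd h.symm hda
        · exact h
      rw [ih hp.2 d hdt]
      have hlt : a < d := lt_of_le_of_ne (hp.1 d hdt) hda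
      simp [hlt]

-- B's placement loop is a pure set-fold (base d = start value of d)
theorem pvBloop (indeg labels : List Int) (base : Int → Int) :
    ∀ (w : List Int) (s : Nat) (nxt : PySem.Dict Int Int) (lst : List Int),
    indeg.drop s = w →
    (∀ d ∈ w, nxt.getD d 0 = base d + ((indeg.take s).count d : Int)) →
    ((PySem.List.enumerate w (s : Int)).foldl
        (fun (st : PySem.Dict Int Int × List Int) q =>
          let p := st.1.getD q.2 0
          (st.1.insert q.2 (p + 1), st.2.set q.1.toNat (PySem.List.pyGetD labels p 0)))
        (nxt, lst)).2
      = (PySem.List.enumerate w (s : Int)).foldl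
          (fun l (q : Int × Int) =>
            l.set q.1.toNat
              (PySem.List.pyGetD labels (base q.2 + ((indeg.take q.1.toNat).count q.2 : Int)) 0))
          lst := by
  intro w
  induction w with
  | nil => intro s nxt lst _ _; rfl
  | cons e t ih =>
    intro s nxt lst hdrop hbase
    have hs : s < indeg.length := by
      by_contra hcon
      rw [List.drop_eq_nil_iff.mpr (by omega)] at hdrop
      simp at hdrop
    have hse : indeg[s] = e := by
      have := List.drop_eq_getElem_cons hs
      rw [hdrop] at this
      exact (List.cons.injEq _ _ _ _).mp this.symm |>.1
    have htake : indeg.take (s + 1) = indeg.take s ++ [e] := by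
      rw [List.take_add_one]
      simp [List.getElem?_eq_getElem hs, hse]
    have hdrop' : indeg.drop (s + 1) = t := by
      have := List.drop_eq_getElem_cons hs
      rw [hdrop, hse] at this
      exact ((List.cons.injEq _ _ _ _).mp this.symm).2
    rw [PySem.List.enumerate_cons, List.foldl_cons, List.foldl_cons]
    have hpe : nxt.getD e 0 = base e + ((indeg.take s).count e : Int) := hbase e (by simp)
    have hcast : ((s : Int) + 1) = ((s + 1 : Nat) : Int) := by push_cast; ring
    simp only [hpe, Int.toNat_natCast, hcast]
    rw [ih (s + 1) _ _ hdrop']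
    intro d hd
    rw [PySem.Dict.getD_insert]
    by_cases hde : d = e
    · subst hde
      rw [if_pos rfl, htake]
      simp
      ring
    · rw [if_neg hde, hbase d (by simp [hd]), htake]
      rw [List.count_append]
      have hed : ¬ e = d := fun h => hde h.symm
      simp [hed]

-- pointwise reading of a distinct-index set-fold
theorem pvSetFoldLen : ∀ (ps : List (Nat × Int)) (z : List Int),
    (ps.foldl (fun l p => l.set p.1 p.2) z).length = z.length := by
  intro ps
  induction ps with
  | nil => intro z; rfl
  | cons q t ih => intro z; simp [List.foldl_cons, ih]

theorem pvSetFoldGetOut : ∀ (ps : List (Nat × Int)) (z : List Int) (j : Nat),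
    j ∉ ps.map (·.1) → (ps.foldl (fun l p => l.set p.1 p.2) z)[j]? = z[j]? := by
  intro ps
  induction ps with
  | nil => intro z j _; rfl
  | cons q t ih =>
    intro z j hj
    simp only [List.map_cons, List.mem_cons, not_or] at hj
    simp only [List.foldl_cons]
    rw [ih _ _ hj.2, List.getElem?_set]
    simp [Ne.symm hj.1]

theorem pvSetFoldGet : ∀ (ps : List (Nat × Int)) (z : List Int) (p : Nat × Int),
    ps.Pairwise (fun a b => a.1 ≠ b.1) → p ∈ ps → p.1 < z.length →
    (ps.foldl (fun l p => l.set p.1 p.2) z)[p.1]? = some p.2 := by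
  intro ps
  induction ps with
  | nil => intro z p _ hp; simp at hp
  | cons q t ih =>
    intro z p hpw hp hlen
    rw [List.pairwise_cons] at hpw
    simp only [List.foldl_cons]
    rcases List.mem_cons.mp hp with rfl | hpt
    · have : p.1 ∉ t.map (·.1) := by
        intro hmem
        obtain ⟨b, hb, hbe⟩ := List.mem_map.mp hmem
        exact hpw.1 b hb hbe.symm
      rw [pvSetFoldGetOut t _ _ this, List.getElem?_set]
      simp [hlen]
    · exact ih _ p hpw.2 hpt (by simpa using hlen)

def pvLex (indeg : List Int) (a b : Int) : Prop :=
  PySem.List.pyGetD indeg a 0 < PySem.List.pyGetD indeg b 0 ∨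
    (PySem.List.pyGetD indeg a 0 = PySem.List.pyGetD indeg b 0 ∧ a < b)

theorem pvInsertBy_pairwise (indeg : List Int) (x : Int) : ∀ (acc : List Int),
    acc.Pairwise (pvLex indeg) → (∀ y ∈ acc, y < x) →
    (PySem.List.insertBy
        (fun a b => decide (PySem.List.pyGetD indeg a 0 < PySem.List.pyGetD indeg b 0)) x
        acc).Pairwise (pvLex indeg) := by
  intro acc
  induction acc with
  | nil => intro _ _; simp [PySem.List.insertBy]
  | cons y t ih =>
    intro hp hlt
    rw [List.pairwise_cons] at hp
    simp only [PySem.List.insertBy]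
    by_cases hxy : PySem.List.pyGetD indeg x 0 < PySem.List.pyGetD indeg y 0
    · simp only [hxy, decide_true, if_true]
      rw [List.pairwise_cons]
      refine ⟨?_, List.pairwise_cons.mpr hp⟩
      intro z hz
      rcases List.mem_cons.mp hz with rfl | hzt
      · exact Or.inl hxy
      · have := hp.1 z hzt
        rcases this with h | ⟨heq, _⟩
        · exact Or.inl (lt_trans hxy h)
        · exact Or.inl (heq ▸ hxy)
    · have hcond : (decide (PySem.List.pyGetD indeg x 0 < PySem.List.pyGetD indeg y 0)) = false := by
        simp [hxy]
      simp only [hcond, Bool.false_eq_true, if_false]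
      rw [List.pairwise_cons]
      constructor
      · intro z hz
        rcases (PySem.List.mem_insertBy _ x z t).mp hz with rfl | hzt
        · have hylt : y < z := hlt y (by simp)
          rcases lt_or_eq_of_le (not_lt.mp hxy) with h | h
          · exact Or.inl h
          · exact Or.inr ⟨h, hylt⟩
        · exact hp.1 z hzt
      · exact ih hp.2 (fun z hz => hlt z (by simp [hz]))

theorem pvFoldl_insertBy_pairwise (indeg : List Int) : ∀ (xs acc : List Int),
    xs.Pairwise (· < ·) → acc.Pairwise (pvLex indeg) → (∀ y ∈ acc, ∀ x ∈ xs, y < x) →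
    (xs.foldl
        (fun acc x =>
          PySem.List.insertBy
            (fun a b => decide (PySem.List.pyGetD indeg a 0 < PySem.List.pyGetD indeg b 0)) x acc)
        acc).Pairwise (pvLex indeg) := by
  intro xs
  induction xs with
  | nil => intro acc _ hacc _; simpa using hacc
  | cons x t ih =>
    intro acc hxs hacc hlt
    rw [List.pairwise_cons] at hxs
    rw [List.foldl_cons]
    apply ih _ hxs.2
    · exact pvInsertBy_pairwise indeg x acc hacc (fun y hy => hlt y hy x (by simp))
    · intro y hy z hz
      rcases (PySem.List.mem_insertBy _ x y acc).mp hy with rfl | hya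
      · exact hxs.1 z hz
      · exact hlt y hya z (by simp [hz])

theorem pvOrder_pairwise (indeg : List Int) :
    (PySem.List.sorted (PySem.List.pyRange 0 (indeg.length : Int))
        (fun x => PySem.List.pyGetD indeg x 0)).Pairwise (pvLex indeg) := by
  rw [PySem.List.sorted_eq_foldl_insertBy]
  apply pvFoldl_insertBy_pairwise
  · rw [PySem.List.pyRange_zero_natCast]
    rw [List.pairwise_map]
    exact List.pairwise_lt_range.imp (fun h => by exact_mod_cast h)
  · exact List.Pairwise.nil
  · simp

-- sorted(indeg) is the key image of the argsorted index list
theorem pvValsEq (indeg : List Int) :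
    PySem.List.sorted indeg (fun x => x)
      = (PySem.List.sorted (PySem.List.pyRange 0 (indeg.length : Int))
          (fun x => PySem.List.pyGetD indeg x 0)).map (fun x => PySem.List.pyGetD indeg x 0) := by
  apply PySem.List.sorted_id_eq_of_perm_of_pairwise
  · have h1 := (PySem.List.sorted_perm (PySem.List.pyRange 0 (indeg.length : Int))
      (fun x => PySem.List.pyGetD indeg x 0) false).map (fun x => PySem.List.pyGetD indeg x 0)
    have h2 := PySem.List.map_pyGetD_pyRange_zero indeg 0
    simpa [PySem.List.len] using h1.trans (by rw [show PySem.List.pyRange 0 (indeg.length : Int) = PySem.List.pyRange 0 (PySem.List.len indeg) from rfl, h2])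
  · exact PySem.List.sorted_map_key_pairwise _ _

theorem pvCountPOr {p q : Nat → Prop} [DecidablePred p] [DecidablePred q] : ∀ (l : List Nat),
    (∀ x ∈ l, ¬(p x ∧ q x)) →
    l.countP (fun x => decide (p x ∨ q x))
      = l.countP (fun x => decide (p x)) + l.countP (fun x => decide (q x)) := by
  intro l
  induction l with
  | nil => intro _; rfl
  | cons a t ih =>
    intro h
    simp only [List.countP_cons]
    rw [ih (fun x hx => h x (by simp [hx]))]
    have := h a (by simp)
    by_cases hp : p a
    · have hq : ¬ q a := fun hq => this ⟨hp, hq⟩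
      simp [hp, hq]
      omega
    · by_cases hq : q a <;> simp [hp, hq]
      omega

theorem pvMapRangeTake (l : List Int) (j : Nat) (hj : j ≤ l.length) :
    (List.range j).map (fun (u : Nat) => PySem.List.pyGetD l (u : Int) 0) = l.take j := by
  apply List.ext_getElem
  · simp [hj]
  · intro i h1 h2
    simp only [List.getElem_map, List.getElem_range, List.getElem_take]
    have hi : i < l.length := by simp at h2; omega
    rw [PySem.List.pyGetD_eq_getElem l 0 (by positivity) (by exact_mod_cast hi)]
    simp

theorem pvZipPairwise : ∀ (l : List Nat) (m : List Int),
    l.Pairwise (· ≠ ·) → (l.zip m).Pairwise (fun a b => a.1 ≠ b.1) := by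
  intro l
  induction l with
  | nil => intro m _; simp
  | cons a t ih =>
    intro m hp
    cases m with
    | nil => simp
    | cons b mt =>
      rw [List.pairwise_cons] at hp
      rw [List.zip_cons_cons, List.pairwise_cons]
      refine ⟨?_, ih mt hp.2⟩
      intro q hq
      exact hp.1 q.1 (List.of_mem_zip hq).1

-- the stable rank of index j in the argsorted list equals "smaller values + earlier equal values"
theorem pvRankEq (indeg : List Int) (j : Nat) (hj : j < indeg.length) (l1 l2 : List Int)
    (hdec : PySem.List.sorted (PySem.List.pyRange 0 (indeg.length : Int))
        (fun x => PySem.List.pyGetD indeg x 0) = l1 ++ (j : Int) :: l2) :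
    l1.length = (PySem.List.sorted indeg (fun x => x)).countP (fun x => decide (x < indeg[j]))
      + (indeg.take j).count indeg[j] := by
  obtain ⟨c, hcc⟩ : ∃ c, indeg[j] = c := ⟨_, rfl⟩
  rw [hcc]
  have hfj : PySem.List.pyGetD indeg (j : Int) 0 = c := by
    rw [PySem.List.pyGetD_eq_getElem indeg 0 (by positivity) (by exact_mod_cast hj)]
    simpa using hcc
  have hpair := pvOrder_pairwise indeg
  rw [hdec] at hpair
  have hperm := PySem.List.sorted_perm (PySem.List.pyRange 0 (indeg.length : Int))
    (fun x => PySem.List.pyGetD indeg x 0) false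
  rw [hdec] at hperm
  -- (a) the elements before j are exactly those lex-below j
  have ha : (l1 ++ (j : Int) :: l2).countP (fun u => decide
        (PySem.List.pyGetD indeg u 0 < PySem.List.pyGetD indeg (j : Int) 0
          ∨ (PySem.List.pyGetD indeg u 0 = PySem.List.pyGetD indeg (j : Int) 0 ∧ u < (j : Int))))
      = l1.length := by
    rw [List.countP_append]
    obtain ⟨hp1, hp2, hcross⟩ := List.pairwise_append.mp hpair
    have h1 : l1.countP (fun u => decide
        (PySem.List.pyGetD indeg u 0 < PySem.List.pyGetD indeg (j : Int) 0
          ∨ (PySem.List.pyGetD indeg u 0 = PySem.List.pyGetD indeg (j : Int) 0 ∧ u < (j : Int))))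
        = l1.length := by
      rw [List.countP_eq_length]
      intro a haa
      have := hcross a haa (j : Int) (by simp)
      simp only [pvLex] at this
      simpa using this
    have h2 : (((j : Int)) :: l2).countP (fun u => decide
        (PySem.List.pyGetD indeg u 0 < PySem.List.pyGetD indeg (j : Int) 0
          ∨ (PySem.List.pyGetD indeg u 0 = PySem.List.pyGetD indeg (j : Int) 0 ∧ u < (j : Int))))
        = 0 := by
      rw [List.countP_eq_zero]
      intro a haa
      rcases List.mem_cons.mp haa with rfl | hal2
      · simp only [decide_eq_true_eq]
        omega
      · have hja := (List.pairwise_cons.mp hp2).1 a hal2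
        simp only [pvLex] at hja
        simp only [decide_eq_true_eq]
        omega
    omega
  -- (b,c) transport the count to range n
  have hb : (l1 ++ (j : Int) :: l2).countP (fun u => decide
        (PySem.List.pyGetD indeg u 0 < PySem.List.pyGetD indeg (j : Int) 0
          ∨ (PySem.List.pyGetD indeg u 0 = PySem.List.pyGetD indeg (j : Int) 0 ∧ u < (j : Int))))
      = (List.range indeg.length).countP
          (fun (u : Nat) => decide
            (PySem.List.pyGetD indeg (u : Int) 0 < PySem.List.pyGetD indeg (j : Int) 0
              ∨ (PySem.List.pyGetD indeg (u : Int) 0 = PySem.List.pyGetD indeg (j : Int) 0 ∧ (u : Int) < (j : Int)))) := by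
    rw [hperm.countP_eq, PySem.List.pyRange_zero_natCast, List.countP_map]
    rfl
  -- (d) split the lex condition into two disjoint counts
  have hsplit : (List.range indeg.length).countP
          (fun (u : Nat) => decide
            (PySem.List.pyGetD indeg (u : Int) 0 < PySem.List.pyGetD indeg (j : Int) 0
              ∨ (PySem.List.pyGetD indeg (u : Int) 0 = PySem.List.pyGetD indeg (j : Int) 0 ∧ (u : Int) < (j : Int))))
      = (List.range indeg.length).countP
          (fun (u : Nat) => decide (PySem.List.pyGetD indeg (u : Int) 0 < PySem.List.pyGetD indeg (j : Int) 0))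
        + (List.range indeg.length).countP
            (fun (u : Nat) => decide (PySem.List.pyGetD indeg (u : Int) 0 = PySem.List.pyGetD indeg (j : Int) 0 ∧ (u : Int) < (j : Int))) := by
    exact pvCountPOr (List.range indeg.length) (fun x _ h => by omega)
  -- (e) the first count is the number of strictly smaller values
  have he : (List.range indeg.length).countP
        (fun (u : Nat) => decide (PySem.List.pyGetD indeg (u : Int) 0 < PySem.List.pyGetD indeg (j : Int) 0))
      = (PySem.List.sorted indeg (fun x => x)).countP (fun x => decide (x < c)) := by
    rw [(PySem.List.sorted_perm indeg (fun x => x) false).countP_eq]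
    have hmap := pvMapRangeTake indeg indeg.length le_rfl
    rw [List.take_length] at hmap
    conv_rhs => rw [← hmap]
    rw [List.countP_map]
    exact List.countP_congr (fun x _ => by simp [Function.comp, hfj])
  -- (f) the second count is the number of earlier equal values
  have hf : (List.range indeg.length).countP
        (fun (u : Nat) => decide (PySem.List.pyGetD indeg (u : Int) 0 = PySem.List.pyGetD indeg (j : Int) 0 ∧ (u : Int) < (j : Int)))
      = (indeg.take j).count c := by
    have hjn : j + (indeg.length - j) = indeg.length := by omega
    have hr : List.range indeg.length = List.range j ++ List.range' j (indeg.length - j) := by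
      rw [List.range_eq_range', List.range_eq_range', ← hjn, ← List.range'_append]
      simp
    rw [hr, List.countP_append]
    have h2 : (List.range' j (indeg.length - j)).countP
        (fun (u : Nat) => decide (PySem.List.pyGetD indeg (u : Int) 0 = PySem.List.pyGetD indeg (j : Int) 0 ∧ (u : Int) < (j : Int))) = 0 := by
      rw [List.countP_eq_zero]
      intro a haa
      obtain ⟨i, _, rfl⟩ := List.mem_range'.mp haa
      simp only [decide_eq_true_eq, not_and]
      intro _
      push_cast
      omega
    have h1 : (List.range j).countP
        (fun (u : Nat) => decide (PySem.List.pyGetD indeg (u : Int) 0 = PySem.List.pyGetD indeg (j : Int) 0 ∧ (u : Int) < (j : Int)))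
      = (indeg.take j).count c := by
      rw [List.countP_congr (q := fun (u : Nat) => decide
          (PySem.List.pyGetD indeg (u : Int) 0 = PySem.List.pyGetD indeg (j : Int) 0))
        (fun x hx => by
          have := List.mem_range.mp hx
          simp only [decide_eq_true_eq]
          constructor
          · exact fun h => h.1
          · exact fun h => ⟨h, by exact_mod_cast this⟩)]
      have hmap := pvMapRangeTake indeg j (le_of_lt hj)
      rw [List.count_eq_countP]
      conv_rhs => rw [← hmap]
      rw [List.countP_map]
      exact List.countP_congr (fun x _ => by simp [Function.comp, hfj])
    omega
  omega

theorem pvListsEq (indeg : List Int) :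
    ((((PySem.List.sorted (PySem.List.pyRange 0 (indeg.length : Int))
          (fun x => PySem.List.pyGetD indeg x 0)).map Int.toNat).zip
        (pvLabs ((PySem.List.sorted (PySem.List.pyRange 0 (indeg.length : Int))
            (fun x => PySem.List.pyGetD indeg x 0)).map (fun x => PySem.List.pyGetD indeg x 0))
          0 0 0).1).foldl
      (fun l p => l.set p.1 p.2) (List.replicate indeg.length (0 : Int)))
    = (((PySem.List.enumerate indeg 0).map (fun q =>
          (q.1.toNat, PySem.List.pyGetD (pvLabs (PySem.List.sorted indeg (fun x => x)) 0 0 0).1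
            ((((PySem.List.sorted indeg (fun x => x)).countP
                (fun x => decide (x < q.2)) : Nat) : Int)
              + ((indeg.take q.1.toNat).count q.2 : Int)) 0))).foldl
        (fun l p => l.set p.1 p.2) (List.replicate indeg.length (0 : Int))) := by
  have hOV := pvValsEq indeg
  have horder : (PySem.List.sorted (PySem.List.pyRange 0 (indeg.length : Int))
      (fun x => PySem.List.pyGetD indeg x 0)).length = indeg.length := by
    rw [PySem.List.length_sorted, PySem.List.pyRange_zero_natCast]
    simp
  have hvals : (PySem.List.sorted indeg (fun x => x)).length = indeg.length :=
    PySem.List.length_sorted _ _ _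
  have hlabs : (pvLabs (PySem.List.sorted indeg (fun x => x)) 0 0 0).1.length = indeg.length := by
    rw [pvLabs_length, hvals]
  rw [← hOV]
  -- nodup / pairwise facts
  have hpermO := PySem.List.sorted_perm (PySem.List.pyRange 0 (indeg.length : Int))
    (fun x => PySem.List.pyGetD indeg x 0) false
  have hndR : (PySem.List.pyRange 0 (indeg.length : Int)).Nodup := by
    rw [PySem.List.pyRange_zero_natCast]
    exact List.nodup_range.map (fun a b h => by exact_mod_cast h)
  have hndO : (PySem.List.sorted (PySem.List.pyRange 0 (indeg.length : Int))
      (fun x => PySem.List.pyGetD indeg x 0)).Nodup := hpermO.nodup_iff.mpr hndR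
  have hnonneg : ∀ x ∈ PySem.List.sorted (PySem.List.pyRange 0 (indeg.length : Int))
      (fun x => PySem.List.pyGetD indeg x 0), 0 ≤ x ∧ x < (indeg.length : Int) := by
    intro x hx
    have := (PySem.List.mem_sorted _ _ _ _).mp hx
    exact PySem.List.mem_pyRange_one.mp this
  have hndON : ((PySem.List.sorted (PySem.List.pyRange 0 (indeg.length : Int))
      (fun x => PySem.List.pyGetD indeg x 0)).map Int.toNat).Nodup := by
    apply List.Nodup.map_on _ hndO
    intro x hx y hy hxy
    have h1 := (hnonneg x hx).1
    have h2 := (hnonneg y hy).1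
    omega
  have hpwA : ((((PySem.List.sorted (PySem.List.pyRange 0 (indeg.length : Int))
      (fun x => PySem.List.pyGetD indeg x 0)).map Int.toNat).zip
        (pvLabs (PySem.List.sorted indeg (fun x => x)) 0 0 0).1).Pairwise
      (fun a b => a.1 ≠ b.1)) := pvZipPairwise _ _ hndON
  have hpwB : (((PySem.List.enumerate indeg 0).map (fun q =>
      (q.1.toNat, PySem.List.pyGetD (pvLabs (PySem.List.sorted indeg (fun x => x)) 0 0 0).1
        ((((PySem.List.sorted indeg (fun x => x)).countP
            (fun x => decide (x < q.2)) : Nat) : Int)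
          + ((indeg.take q.1.toNat).count q.2 : Int)) 0))).Pairwise
      (fun a b => a.1 ≠ b.1)) := by
    rw [List.pairwise_map]
    refine (PySem.List.pairwise_lt_enumerate indeg 0).imp_of_mem ?_
    intro p q hp hq hlt
    obtain ⟨kp, _, rfl⟩ := (PySem.List.mem_enumerate_iff _ _ _).mp hp
    obtain ⟨kq, _, rfl⟩ := (PySem.List.mem_enumerate_iff _ _ _).mp hq
    simp only [zero_add] at hlt ⊢
    omega
  -- lengths of the two folds
  apply List.ext_getElem?
  intro j
  by_cases hjn : j < indeg.length
  · -- position of j in the sorted index list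
    have hmemj : ((j : Nat) : Int) ∈ PySem.List.sorted (PySem.List.pyRange 0 (indeg.length : Int))
        (fun x => PySem.List.pyGetD indeg x 0) := by
      rw [PySem.List.mem_sorted]
      exact PySem.List.mem_pyRange_one.mpr ⟨by positivity, by exact_mod_cast hjn⟩
    obtain ⟨l1, l2, hdec⟩ := List.append_of_mem hmemj
    have hi : l1.length < indeg.length := by
      have := congrArg List.length hdec
      rw [horder] at this
      simp at this
      omega
    have hrank := pvRankEq indeg j hjn l1 l2 hdec
    -- A side value
    have hgetA : ((((PySem.List.sorted (PySem.List.pyRange 0 (indeg.length : Int))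
          (fun x => PySem.List.pyGetD indeg x 0)).map Int.toNat).zip
            (pvLabs (PySem.List.sorted indeg (fun x => x)) 0 0 0).1).foldl
        (fun l p => l.set p.1 p.2) (List.replicate indeg.length (0 : Int)))[j]?
        = some ((pvLabs (PySem.List.sorted indeg (fun x => x)) 0 0 0).1[l1.length]'(by omega)) := by
      have hmlen : ((PySem.List.sorted (PySem.List.pyRange 0 (indeg.length : Int))
          (fun x => PySem.List.pyGetD indeg x 0)).map Int.toNat).length = indeg.length := by
        rw [List.length_map, horder]
      have hziplen : l1.length < ((((PySem.List.sorted (PySem.List.pyRange 0 (indeg.length : Int))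
          (fun x => PySem.List.pyGetD indeg x 0)).map Int.toNat).zip
            (pvLabs (PySem.List.sorted indeg (fun x => x)) 0 0 0).1)).length := by
        rw [List.length_zip, hmlen, hlabs]
        omega
      have hpair1 : (((((PySem.List.sorted (PySem.List.pyRange 0 (indeg.length : Int))
          (fun x => PySem.List.pyGetD indeg x 0)).map Int.toNat).zip
            (pvLabs (PySem.List.sorted indeg (fun x => x)) 0 0 0).1))[l1.length]'hziplen)
          = (j, (pvLabs (PySem.List.sorted indeg (fun x => x)) 0 0 0).1[l1.length]'(by omega)) := by
        rw [List.getElem_zip]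
        congr 1
        rw [List.getElem_map]
        have hq : (PySem.List.sorted (PySem.List.pyRange 0 (indeg.length : Int))
            (fun x => PySem.List.pyGetD indeg x 0))[l1.length]? = some ((j : Nat) : Int) := by
          rw [hdec, List.getElem?_append_right (le_refl l1.length)]
          simp
        have hq2 := List.getElem?_eq_getElem (l := PySem.List.sorted (PySem.List.pyRange 0 (indeg.length : Int))
            (fun x => PySem.List.pyGetD indeg x 0)) (i := l1.length) (by omega)
        rw [hq] at hq2
        have hq3 : (PySem.List.sorted (PySem.List.pyRange 0 (indeg.length : Int))
            (fun x => PySem.List.pyGetD indeg x 0))[l1.length]'(by omega) = ((j : Nat) : Int) :=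
          (Option.some_inj.mp hq2).symm
        rw [hq3]
        simp
      have := pvSetFoldGet _ (List.replicate indeg.length (0 : Int)) _ hpwA
        (List.getElem_mem hziplen) (by rw [hpair1]; simpa using hjn)
      rw [hpair1] at this
      simpa using this
    -- B side value
    have hmemB : ((j : Int), indeg[j]'hjn) ∈ PySem.List.enumerate indeg 0 := by
      rw [PySem.List.mem_enumerate_iff]
      exact ⟨j, hjn, by simp⟩
    have hgetB : ((((PySem.List.enumerate indeg 0).map (fun q =>
          (q.1.toNat, PySem.List.pyGetD (pvLabs (PySem.List.sorted indeg (fun x => x)) 0 0 0).1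
            ((((PySem.List.sorted indeg (fun x => x)).countP
                (fun x => decide (x < q.2)) : Nat) : Int)
              + ((indeg.take q.1.toNat).count q.2 : Int)) 0))).foldl
        (fun l p => l.set p.1 p.2) (List.replicate indeg.length (0 : Int))))[j]?
        = some (PySem.List.pyGetD (pvLabs (PySem.List.sorted indeg (fun x => x)) 0 0 0).1
            ((((PySem.List.sorted indeg (fun x => x)).countP
                (fun x => decide (x < indeg[j]'hjn)) : Nat) : Int)
              + ((indeg.take j).count (indeg[j]'hjn) : Int)) 0) := by
      have hmem2 := List.mem_map_of_mem (f := (fun q : Int × Int =>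
          (q.1.toNat, PySem.List.pyGetD (pvLabs (PySem.List.sorted indeg (fun x => x)) 0 0 0).1
            ((((PySem.List.sorted indeg (fun x => x)).countP
                (fun x => decide (x < q.2)) : Nat) : Int)
              + ((indeg.take q.1.toNat).count q.2 : Int)) 0))) hmemB
      have := pvSetFoldGet _ (List.replicate indeg.length (0 : Int)) _ hpwB hmem2
        (by simpa using hjn)
      simpa using this
    rw [hgetA, hgetB]
    -- the looked-up label is the rank-th entry
    congr 1
    have hidx : ((((PySem.List.sorted indeg (fun x => x)).countP
          (fun x => decide (x < indeg[j]'hjn)) : Nat) : Int)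
        + ((indeg.take j).count (indeg[j]'hjn) : Int)) = (l1.length : Int) := by
      rw [hrank]
      push_cast
      ring
    rw [hidx]
    rw [PySem.List.pyGetD_eq_getElem _ 0 (by positivity) (by rw [hlabs]; exact_mod_cast hi)]
    simp
  · -- out of range on both sides
    rw [List.getElem?_eq_none, List.getElem?_eq_none]
    · rw [pvSetFoldLen]
      simp
      omega
    · rw [pvSetFoldLen]
      simp
      omega

theorem pvMain (indeg : List Int) : sccTourByIndegs indeg = sccTourByIndegs_alt indeg := by
  have horder : (PySem.List.sorted (PySem.List.pyRange 0 (indeg.length : Int))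
      (fun x => PySem.List.pyGetD indeg x 0)).length = indeg.length := by
    rw [PySem.List.length_sorted, PySem.List.pyRange_zero_natCast]
    simp
  have hvals : (PySem.List.sorted indeg (fun x => x)).length = indeg.length :=
    PySem.List.length_sorted _ _ _
  have hz0 : PySem.List.pyRepeat [(0 : Int)] (indeg.length : Int)
      = List.replicate indeg.length (0 : Int) := by
    rw [PySem.List.pyRepeat_singleton]
    simp
  -- A side reduced to a pure set-fold
  have hA := pvFoldA indeg
    (PySem.List.sorted (PySem.List.pyRange 0 (indeg.length : Int))
      (fun x => PySem.List.pyGetD indeg x 0))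
    (PySem.List.sorted (PySem.List.pyRange 0 (indeg.length : Int))
      (fun x => PySem.List.pyGetD indeg x 0)) 0 List.drop_zero
    (PySem.List.pyRepeat [(0 : Int)] (indeg.length : Int)) 0 0
  rw [horder] at hA
  simp only [Nat.cast_zero] at hA
  have hRS := pvRunToSets indeg
    (PySem.List.sorted (PySem.List.pyRange 0 (indeg.length : Int))
      (fun x => PySem.List.pyGetD indeg x 0)) 0
    (PySem.List.pyRepeat [(0 : Int)] (indeg.length : Int)) 0 0
  -- B side: labels pass
  have hL := pvLabelsFold (PySem.List.sorted indeg (fun x => x)) 0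
    (PySem.List.pyRepeat [(0 : Int)] (indeg.length : Int)) 0 0
    (by rw [hz0]; simp [hvals])
  simp only [Nat.cast_zero, List.take_zero, List.nil_append, zero_add] at hL
  have hLdrop : (PySem.List.pyRepeat [(0 : Int)] (indeg.length : Int)).drop
      ((PySem.List.sorted indeg (fun x => x)).length) = [] := by
    rw [hz0, hvals]
    simp
  rw [hLdrop, List.append_nil] at hL
  -- B side: start dict values
  have hstart : ∀ d ∈ indeg,
      ((PySem.List.enumerate (PySem.List.sorted indeg (fun x => x)) 0).foldl
          (fun (st : PySem.Dict Int Int) p =>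
            if st.contains p.2 then st else st.insert p.2 p.1)
          PySem.Dict.empty).getD d 0
        = (((PySem.List.sorted indeg (fun x => x)).countP (fun x => decide (x < d)) : Nat) : Int) := by
    intro d hd
    rw [PySem.Dict.getD_eq_get?_getD, pvStartGet]
    rw [if_neg (by simp [PySem.Dict.contains_empty])]
    have hdv : d ∈ PySem.List.sorted indeg (fun x => x) :=
      (PySem.List.mem_sorted _ _ _ _).mpr hd
    have hpw : (PySem.List.sorted indeg (fun x => x)).Pairwise (· ≤ ·) :=
      PySem.List.sorted_pairwise indeg (fun x => x)
    rw [pvIdxOfSorted _ hpw d hdv]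
    simp
  -- B side: placement loop
  have hB := pvBloop indeg
    ((pvLabs (PySem.List.sorted indeg (fun x => x)) 0 0 0).1)
    (fun d => (((PySem.List.sorted indeg (fun x => x)).countP (fun x => decide (x < d)) : Nat) : Int))
    indeg 0
    ((PySem.List.enumerate (PySem.List.sorted indeg (fun x => x)) 0).foldl
      (fun (st : PySem.Dict Int Int) p =>
        if st.contains p.2 then st else st.insert p.2 p.1)
      PySem.Dict.empty)
    (PySem.List.pyRepeat [(0 : Int)] (indeg.length : Int))
    List.drop_zero
    (by intro d hd; rw [hstart d hd]; simp)
  simp only [Nat.cast_zero] at hB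
  have hOV := pvValsEq indeg
  simp only [sccTourByIndegs, sccTourByIndegs_alt]
  rw [hA]
  have hL1 : ((PySem.List.enumerate (PySem.List.sorted indeg (fun x => x)) 0).foldl
      (fun (st : List Int × Int × Int) p =>
        let labels' := st.1.set p.1.toNat st.2.2
        let s' := st.2.1 + p.2
        (labels', s', if s' = PySem.Int.floordiv ((p.1 + 1) * p.1) 2 then st.2.2 + 1 else st.2.2))
      (PySem.List.pyRepeat [(0 : Int)] (indeg.length : Int), 0, 0)).1
      = (pvLabs (PySem.List.sorted indeg (fun x => x)) 0 0 0).1 := by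
    rw [hL]
  have hL22 : ((PySem.List.enumerate (PySem.List.sorted indeg (fun x => x)) 0).foldl
      (fun (st : List Int × Int × Int) p =>
        let labels' := st.1.set p.1.toNat st.2.2
        let s' := st.2.1 + p.2
        (labels', s', if s' = PySem.Int.floordiv ((p.1 + 1) * p.1) 2 then st.2.2 + 1 else st.2.2))
      (PySem.List.pyRepeat [(0 : Int)] (indeg.length : Int), 0, 0)).2.2
      = (pvLabs (PySem.List.sorted indeg (fun x => x)) 0 0 0).2 := by
    rw [hL]
  rw [hL1, hL22, hB]
  rw [hRS.1, hRS.2]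
  rw [hz0]
  congr 1
  · rw [hOV]
  · exact (pvListsEq indeg).trans
      (List.foldl_map
        (f := fun q : Int × Int =>
          (q.1.toNat, PySem.List.pyGetD (pvLabs (PySem.List.sorted indeg (fun x => x)) 0 0 0).1
            ((((PySem.List.sorted indeg (fun x => x)).countP
                (fun x => decide (x < q.2)) : Nat) : Int)
              + ((indeg.take q.1.toNat).count q.2 : Int)) 0))
        (g := fun (l : List Int) (p : Nat × Int) => l.set p.1 p.2)
        (l := PySem.List.enumerate indeg 0)
        (init := List.replicate indeg.length (0 : Int)))

-- ===== VERDICT (by name: the statement is the Claim_ definition above) =====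
theorem sccTourByIndegs_spec : Claim_equal_sccTourByIndegs := by
  intro indeg _
  unfold Spec_sccTourByIndegs
  exact pvMain indeg
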